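-- pv_equiv track=rewrite | github.com/kazamazza/PokerML | features/feature_extractor.py | simplify_action_history
-- ===== SOURCE A (Python) =====
-- from typing import Dict, List, Optional, Union, Tuple
--
-- def simplify_action_history(raw_actions: Union[List[str], str], hero: str) -> str:
--     if isinstance(raw_actions, str):
--         raw_actions = [raw_actions]
--
--     history = []
--     for line in raw_actions:
--         line = line.lower()
--         if "folds" in line:
--             history.append("F")
--         elif "calls" in line:
--             history.append("C")
--         elif "raises" in line or "bets" in line:
--             history.append("R")
--         elif "checks" in line:
--             history.append("X")
--
--     return ''.join(history[-10:])
-- ===== SOURCE B (Python) =====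
-- from typing import List, Union
--
-- def simplify_action_history(raw_actions: Union[List[str], str], hero: str) -> str:
--     if isinstance(raw_actions, str):
--         raw_actions = [raw_actions]
--
--     # Scan backwards, stop as soon as 10 letters are collected.
--     buf = []
--     for line in reversed(raw_actions):
--         line = line.lower()
--         if "folds" in line:
--             buf.append("F")
--         elif "calls" in line:
--             buf.append("C")
--         elif "raises" in line or "bets" in line:
--             buf.append("R")
--         elif "checks" in line:
--             buf.append("X")
--         if len(buf) == 10:
--             break
--     return ''.join(reversed(buf))
-- ===== Notes on version B (the rewrite author's own statement) =====
-- stated objective: alternative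
-- what changed: B scans the action log backwards and stops as soon as 10 letters are collected, then reverses the buffer, instead of classifying every line into a full history list and slicing its last 10 entries.
import Mathlib
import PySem

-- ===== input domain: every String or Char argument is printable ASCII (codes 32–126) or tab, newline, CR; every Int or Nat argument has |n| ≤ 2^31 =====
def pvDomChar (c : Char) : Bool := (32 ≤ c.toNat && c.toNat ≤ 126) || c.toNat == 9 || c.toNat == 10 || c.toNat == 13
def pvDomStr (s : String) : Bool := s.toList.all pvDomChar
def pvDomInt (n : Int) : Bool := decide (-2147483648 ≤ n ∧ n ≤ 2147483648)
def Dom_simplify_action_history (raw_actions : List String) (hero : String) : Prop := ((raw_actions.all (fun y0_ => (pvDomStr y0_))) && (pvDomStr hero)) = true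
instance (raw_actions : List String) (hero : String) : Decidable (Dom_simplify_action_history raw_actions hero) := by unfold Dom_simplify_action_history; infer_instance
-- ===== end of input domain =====

-- ===== PORT A =====
def simplify_action_history (raw_actions : List String) (hero : String) : String :=
  let history := raw_actions.foldl (fun history line =>
    let line := PySem.Str.lower line
    if PySem.Str.isIn "folds" line then history ++ ["F"]
    else if PySem.Str.isIn "calls" line then history ++ ["C"]
    else if PySem.Str.isIn "raises" line || PySem.Str.isIn "bets" line then history ++ ["R"]
    else if PySem.Str.isIn "checks" line then history ++ ["X"]
    else history) []
  PySem.Str.join "" (PySem.List.slice history (some (-10)) none)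

-- ===== PORT B =====
-- B helper: backward scan that stops once the buffer holds 10 letters
def pvAltGo : List String → List String → List String
  | [], buf => buf
  | line :: rest, buf =>
    let line := PySem.Str.lower line
    let buf' :=
      if PySem.Str.isIn "folds" line then buf ++ ["F"]
      else if PySem.Str.isIn "calls" line then buf ++ ["C"]
      else if PySem.Str.isIn "raises" line || PySem.Str.isIn "bets" line then buf ++ ["R"]
      else if PySem.Str.isIn "checks" line then buf ++ ["X"]
      else buf
    if buf'.length = 10 then buf' else pvAltGo rest buf'

def simplify_action_history_alt (raw_actions : List String) (hero : String) : String :=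
  PySem.Str.join "" (pvAltGo raw_actions.reverse []).reverse

-- ===== PRECONDITION & SPEC =====
def Spec_simplify_action_history (raw_actions : List String) (hero : String) (out : String) : Prop := out = simplify_action_history_alt raw_actions hero
instance (raw_actions : List String) (hero : String) (out : String) : Decidable (Spec_simplify_action_history raw_actions hero out) := by unfold Spec_simplify_action_history; infer_instance

-- ===== CLAIM (what is proved, stated in full; the proofs are below) =====
def Claim_equal_simplify_action_history : Prop := ∀ (raw_actions : List String) (hero : String), Dom_simplify_action_history raw_actions hero → Spec_simplify_action_history raw_actions hero (simplify_action_history raw_actions hero)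

-- ===== LEMMAS AND PROOFS =====



-- helper used only in proofs: classification of a single line
def pvClassify (line : String) : Option String :=
  let line := PySem.Str.lower line
  if PySem.Str.isIn "folds" line then some "F"
  else if PySem.Str.isIn "calls" line then some "C"
  else if PySem.Str.isIn "raises" line || PySem.Str.isIn "bets" line then some "R"
  else if PySem.Str.isIn "checks" line then some "X"
  else none

theorem pvHistA (raw : List String) (acc : List String) :
    raw.foldl (fun history line =>
      let line := PySem.Str.lower line
      if PySem.Str.isIn "folds" line then history ++ ["F"]
      else if PySem.Str.isIn "calls" line then history ++ ["C"]
      else if PySem.Str.isIn "raises" line || PySem.Str.isIn "bets" line then history ++ ["R"]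
      else if PySem.Str.isIn "checks" line then history ++ ["X"]
      else history) acc = acc ++ raw.filterMap pvClassify := by
  induction raw generalizing acc with
  | nil => simp
  | cons x xs ih =>
    simp only [List.foldl_cons, List.filterMap_cons, ih, pvClassify]
    split_ifs <;> simp

theorem pvGoSpec (xs : List String) (buf : List String) (h : buf.length < 10) :
    pvAltGo xs buf = (buf ++ xs.filterMap pvClassify).take 10 := by
  induction xs generalizing buf with
  | nil =>
    simp [pvAltGo, List.take_of_length_le (Nat.le_of_lt h)]
  | cons x rest ih =>
    simp only [pvAltGo, List.filterMap_cons]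
    have hcls : (match pvClassify x with
        | some c => buf ++ [c]
        | none => buf) =
      (if PySem.Str.isIn "folds" (PySem.Str.lower x) then buf ++ ["F"]
       else if PySem.Str.isIn "calls" (PySem.Str.lower x) then buf ++ ["C"]
       else if PySem.Str.isIn "raises" (PySem.Str.lower x) || PySem.Str.isIn "bets" (PySem.Str.lower x) then buf ++ ["R"]
       else if PySem.Str.isIn "checks" (PySem.Str.lower x) then buf ++ ["X"]
       else buf) := by
      simp only [pvClassify]; split_ifs <;> rfl
    rw [← hcls]
    cases hc : pvClassify x with
    | none =>
      simp only
      have : ¬ buf.length = 10 := by omega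
      rw [if_neg this, ih buf h]
    | some c =>
      simp only
      by_cases h10 : (buf ++ [c]).length = 10
      · rw [if_pos h10]
        rw [show buf ++ c :: (rest.filterMap pvClassify) = (buf ++ [c]) ++ rest.filterMap pvClassify by simp,
          List.take_append_of_le_length (by omega), List.take_of_length_le (by omega)]
      · rw [if_neg h10]
        have hlt : (buf ++ [c]).length < 10 := by
          simp at h10 ⊢; omega
        rw [ih _ hlt]; simp

theorem simplify_action_history_spec : Claim_equal_simplify_action_history := by
  intro raw hero _
  unfold Spec_simplify_action_history simplify_action_history simplify_action_history_alt
  rw [pvHistA, pvGoSpec _ _ (by simp)]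
  simp only [List.nil_append, List.filterMap_reverse]
  congr 1
  rw [PySem.List.slice_from_neg_ofNat _ 10 (by norm_num)]
  rw [List.take_reverse, List.reverse_reverse]
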